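-- pv_equiv track=rewrite | github.com/farjasju/CliqueCover | helpers.py | cliques_from_list
-- ===== SOURCE A (Python) =====
-- def cliques_from_list(nodes_list, v=None):
--     '''Takes the list X = [1 1 2 3 3 ... ] of nodes containing the label of their associated clique, and returns a dict of the different cliques'''
--     if v is None:
--         v = len(nodes_list)
--     cliques = dict()
--     for i in range(v):
--         clique = nodes_list[i]
--         if clique == 0:
--             continue
--         if clique in list(cliques):
--             cliques[clique].add(i+1)
--         else:
--             cliques[clique] = set([i+1])
--     return cliques
-- ===== SOURCE B (Python) =====
-- def cliques_from_list(nodes_list, v=None):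
--     '''Worklist gather-and-remove: build a (label, position) pair table, then
--     repeatedly take the first remaining label, collect all of its 1-based
--     positions in one sweep, and drop that label from the worklist.'''
--     if v is None:
--         v = len(nodes_list)
--     pairs = [(lab, i + 1) for i, lab in enumerate(nodes_list[:max(v, 0)]) if lab != 0]
--     cliques = {}
--     while pairs:
--         lab = pairs[0][0]
--         cliques[lab] = {j for l, j in pairs if l == lab}
--         pairs = [p for p in pairs if p[0] != lab]
--     return cliques
-- ===== Notes on version B (the rewrite author's own statement) =====
-- stated objective: alternative
-- what changed: Replaces A's single incremental pass that grows a dict of sets element by element (rescanning the rebuilt key list at every step) with a worklist gather-and-remove scheme: build the (label, position) pair table once, then repeatedly take the first remaining label, collect all its positions in one sweep, and filter that label out of the worklist.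
import Mathlib
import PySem

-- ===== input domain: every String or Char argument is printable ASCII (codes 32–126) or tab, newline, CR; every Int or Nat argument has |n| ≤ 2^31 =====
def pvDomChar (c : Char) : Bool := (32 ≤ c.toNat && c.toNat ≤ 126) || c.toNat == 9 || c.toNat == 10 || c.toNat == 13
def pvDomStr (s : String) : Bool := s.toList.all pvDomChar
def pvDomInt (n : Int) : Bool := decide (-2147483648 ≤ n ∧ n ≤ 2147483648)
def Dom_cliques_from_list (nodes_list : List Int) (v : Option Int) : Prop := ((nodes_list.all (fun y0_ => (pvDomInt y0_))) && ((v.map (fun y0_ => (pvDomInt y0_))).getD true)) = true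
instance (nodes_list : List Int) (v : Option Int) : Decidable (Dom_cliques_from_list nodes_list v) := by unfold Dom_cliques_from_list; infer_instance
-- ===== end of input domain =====

-- B replaces A's incremental dict-of-sets pass by a worklist gather-and-remove
-- scheme over a (label, position) pair table (alternative decomposition).

-- ===== PORT A =====
def cliques_from_list (nodes_list : List Int) (v : Option Int) : List (Int × List Int) :=
  let vv : Int := v.getD (nodes_list.length : Int)
  ((PySem.List.pyRange 0 vv 1).foldl
    (fun (cliques : PySem.Dict Int (List Int)) i =>
      let clique := PySem.List.pyGetD nodes_list i 0
      if clique = 0 then cliques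
      else if cliques.contains clique then
        cliques.modify clique [] (fun s => PySem.Set.add s (i + 1))
      else cliques.insert clique (PySem.Set.ofList [i + 1]))
    PySem.Dict.empty).items

-- ===== PORT B =====
-- the while loop: take the first remaining label, gather all its positions (the
-- dict assignment 'cliques[lab] = …' is always to a fresh key, i.e. an append),
-- drop that label from the worklist
def pvGo : List (Int × List Int) → List (Int × Int) → List (Int × List Int)
  | acc, [] => acc
  | acc, p :: t =>
    pvGo (acc ++ [(p.1, PySem.Set.ofList (((p :: t).filter (fun q => q.1 == p.1)).map (fun q => q.2)))])
      ((p :: t).filter (fun q => q.1 != p.1))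
termination_by _ ps => ps.length
decreasing_by
  simp only [List.filter_cons, bne_self_eq_false, Bool.false_eq_true, if_false, List.length_cons]
  have := List.length_filter_le (fun q : Int × Int => q.1 != p.1) t
  omega

def cliques_from_list_alt (nodes_list : List Int) (v : Option Int) : List (Int × List Int) :=
  let vv : Int := v.getD (nodes_list.length : Int)
  let pairs := ((PySem.List.enumerate (PySem.List.slice nodes_list none (some (max vv 0))) 0).filter
      (fun p => p.2 != 0)).map (fun p => (p.2, p.1 + 1))
  pvGo [] pairs

-- ===== PRECONDITION & SPEC =====
-- Pre_ excludes exactly the inputs where A raises IndexError (an explicit v larger than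
-- len(nodes_list), where B instead clamps the slice and groups the whole list).
def Pre_cliques_from_list (nodes_list : List Int) (v : Option Int) : Prop :=
  v.getD 0 ≤ (nodes_list.length : Int)
instance (nodes_list : List Int) (v : Option Int) : Decidable (Pre_cliques_from_list nodes_list v) := by unfold Pre_cliques_from_list; infer_instance

def pvWitness_cliques_from_list : List Int × Option Int := ([1, 0, 2, 1], some 3)

def Spec_cliques_from_list (nodes_list : List Int) (v : Option Int) (out : List (Int × List Int)) : Prop := out = cliques_from_list_alt nodes_list v
instance (nodes_list : List Int) (v : Option Int) (out : List (Int × List Int)) : Decidable (Spec_cliques_from_list nodes_list v out) := by unfold Spec_cliques_from_list; infer_instance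

-- ===== CLAIM (what is proved, stated in full; the proofs are below) =====
def Claim_equal_cliques_from_list : Prop := ∀ (nodes_list : List Int) (v : Option Int), Dom_cliques_from_list nodes_list v → Pre_cliques_from_list nodes_list v → Spec_cliques_from_list nodes_list v (cliques_from_list nodes_list v)

-- ===== LEMMAS AND PROOFS =====

-- the first-occurrence key order of A's dict
def pvOrdf (o : List Int) (lab : Int) : List Int := if lab ≠ 0 ∧ lab ∉ o then o ++ [lab] else o

-- each label's 1-based index list
def pvIdxs (ls : List Int) (lab : Int) : List Int :=
  ((PySem.List.enumerate ls 0).filter (fun p => p.2 == lab)).map (fun p => p.1 + 1)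

def pvGroup (ls : List Int) : List (Int × List Int) :=
  (ls.foldl pvOrdf []).map (fun lab => (lab, pvIdxs ls lab))

-- A's loop body over an (index, label) pair
def pvStep (d : PySem.Dict Int (List Int)) (p : Int × Int) : PySem.Dict Int (List Int) :=
  if p.2 = 0 then d
  else if d.contains p.2 then d.modify p.2 [] (fun s => PySem.Set.add s (p.1 + 1))
  else d.insert p.2 (PySem.Set.ofList [p.1 + 1])

def pvBuild (ls : List Int) : PySem.Dict Int (List Int) :=
  (PySem.List.enumerate ls 0).foldl pvStep PySem.Dict.empty

theorem pv_mem_ordFold (ls : List Int) (o : List Int) (y : Int) :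
    y ∈ ls.foldl pvOrdf o ↔ y ∈ o ∨ (y ∈ ls ∧ y ≠ 0) := by
  induction ls generalizing o with
  | nil => simp
  | cons x t ih =>
    simp only [List.foldl_cons, ih, pvOrdf]
    split_ifs with h
    all_goals aesop

theorem pv_nodup_ordFold (ls : List Int) (o : List Int) (h : o.Nodup) :
    (ls.foldl pvOrdf o).Nodup := by
  induction ls generalizing o with
  | nil => simpa
  | cons x t ih =>
    simp only [List.foldl_cons, pvOrdf]
    split_ifs with hx
    · refine ih _ ?_
      simp only [List.nodup_append, List.nodup_singleton, true_and, h]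
      intro a ha b hb
      simp only [List.mem_singleton] at hb
      subst hb
      exact fun hax => hx.2 (hax ▸ ha)
    · exact ih _ h

theorem pv_mem_idxs (ls : List Int) (lab y : Int) (h : y ∈ pvIdxs ls lab) :
    1 ≤ y ∧ y ≤ (ls.length : Int) := by
  simp only [pvIdxs, List.mem_map, List.mem_filter] at h
  obtain ⟨p, ⟨hp, -⟩, rfl⟩ := h
  rw [PySem.List.mem_enumerate_iff] at hp
  obtain ⟨k, hk, rfl⟩ := hp
  refine ⟨by simp, by simp; omega⟩

theorem pv_nodup_idxs (ls : List Int) (lab : Int) : (pvIdxs ls lab).Nodup := by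
  have h1 : (((PySem.List.enumerate ls 0).filter (fun p => p.2 == lab)).map
      (fun p : Int × Int => p.1 + 1)).Pairwise (· < ·) := by
    rw [List.pairwise_map]
    exact (List.Pairwise.sublist List.filter_sublist
      (PySem.List.pairwise_lt_enumerate ls 0)).imp (fun h => by omega)
  exact h1.imp (fun h => ne_of_lt h)

theorem pv_idxs_append (ls : List Int) (x lab : Int) :
    pvIdxs (ls ++ [x]) lab =
      if x = lab then pvIdxs ls lab ++ [(ls.length : Int) + 1] else pvIdxs ls lab := by
  simp only [pvIdxs, PySem.List.enumerate_append, PySem.List.enumerate_cons,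
    PySem.List.enumerate_nil, List.filter_append, List.map_append, zero_add]
  split_ifs with h
  · subst h; simp
  · simp [h]

theorem pv_idxs_of_not_mem (ls : List Int) (x : Int) (h : x ∉ ls) : pvIdxs ls x = [] := by
  simp only [pvIdxs, List.map_eq_nil_iff, List.filter_eq_nil_iff]
  intro p hp
  rw [PySem.List.mem_enumerate_iff] at hp
  obtain ⟨k, hk, rfl⟩ := hp
  simp only [beq_iff_eq]
  exact fun hEq => h (hEq ▸ List.getElem_mem hk)

theorem pv_build_eq (ls : List Int) : pvBuild ls = PySem.Dict.mk (pvGroup ls) := by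
  induction ls using List.reverseRecOn with
  | nil => rfl
  | append_singleton t x ih =>
    have hstep : pvBuild (t ++ [x]) = pvStep (pvBuild t) ((t.length : Int), x) := by
      simp [pvBuild, PySem.List.enumerate_append, PySem.List.enumerate_cons,
        PySem.List.enumerate_nil, List.foldl_append]
    rw [hstep, ih]
    have hkeys : (PySem.Dict.mk (pvGroup t)).keys = t.foldl pvOrdf [] := by
      simp [PySem.Dict.keys_mk, pvGroup, List.map_map, Function.comp_def]
    have hknd : (PySem.Dict.mk (pvGroup t)).keys.Nodup := by
      rw [hkeys]; exact pv_nodup_ordFold t [] (by simp)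
    have hcont : (PySem.Dict.mk (pvGroup t)).contains x = decide (x ∈ t.foldl pvOrdf []) := by
      rw [PySem.Dict.contains_eq_decide_mem_keys, hkeys]
    by_cases hx0 : x = 0
    · -- label 0 is skipped by both
      subst hx0
      have hord : (t ++ [0]).foldl pvOrdf [] = t.foldl pvOrdf [] := by
        simp [List.foldl_append, pvOrdf]
      have h0 : pvStep (PySem.Dict.mk (pvGroup t)) ((t.length : Int), 0)
          = PySem.Dict.mk (pvGroup t) := by simp [pvStep]
      rw [h0]
      congr 1
      simp only [pvGroup, hord]
      refine List.map_congr_left (fun lab hlab => ?_)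
      have hne : lab ≠ 0 := ((pv_mem_ordFold t [] lab).1 hlab).elim (by simp) (fun h => h.2)
      rw [pv_idxs_append]
      simp [Ne.symm hne]
    · by_cases hmem : x ∈ t.foldl pvOrdf []
      · -- existing clique: in-place update of its set
        have hord : (t ++ [x]).foldl pvOrdf [] = t.foldl pvOrdf [] := by
          simp [List.foldl_append, pvOrdf, hmem]
        have hitem : (x, pvIdxs t x) ∈ (PySem.Dict.mk (pvGroup t)).items := by
          simp only [pvGroup]
          exact List.mem_map.2 ⟨x, hmem, rfl⟩
        have hget : (PySem.Dict.mk (pvGroup t)).getD x [] = pvIdxs t x :=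
          PySem.Dict.getD_of_mem_items _ hitem hknd []
        have hnotmem : ((t.length : Int) + 1) ∉ pvIdxs t x := fun h => by
          have := pv_mem_idxs t x _ h; omega
        have hadd : PySem.Set.add (pvIdxs t x) ((t.length : Int) + 1)
            = pvIdxs t x ++ [(t.length : Int) + 1] := by
          simp [PySem.Set.add, PySem.Set.contains, hnotmem]
        simp only [pvStep, if_neg hx0, hcont, decide_eq_true_eq, if_pos hmem,
          PySem.Dict.modify, hget, hadd]
        have hconts : (PySem.Dict.mk (pvGroup t)).contains x = true := by
          rw [hcont]; simpa
        apply PySem.Dict.ext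
        rw [PySem.Dict.items_insert_of_contains _ _ hconts]
        simp only [pvGroup, hord, List.map_map]
        refine List.map_congr_left (fun lab hlab => ?_)
        by_cases hlx : lab = x
        · subst hlx
          simp [pv_idxs_append]
        · have : (lab == x) = false := by simp [hlx]
          simp only [Function.comp, this]
          rw [pv_idxs_append]
          simp [Ne.symm hlx]
      · -- new clique: append a fresh singleton set
        have hord : (t ++ [x]).foldl pvOrdf [] = t.foldl pvOrdf [] ++ [x] := by
          simp [List.foldl_append, pvOrdf, hx0, hmem]
        have hxnt : x ∉ t := fun h =>
          hmem ((pv_mem_ordFold t [] x).2 (Or.inr ⟨h, hx0⟩))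
        have hconts : (PySem.Dict.mk (pvGroup t)).contains x = false := by
          rw [hcont]; simpa
        simp only [pvStep, if_neg hx0, hconts, Bool.false_eq_true, if_false]
        apply PySem.Dict.ext
        rw [PySem.Dict.items_insert_of_not_contains _ _ hconts]
        simp only [pvGroup, hord, List.map_append, List.map_cons, List.map_nil]
        congr 1
        · refine List.map_congr_left (fun lab hlab => ?_)
          have hlx : lab ≠ x := fun h => hmem (h ▸ hlab)
          rw [pv_idxs_append]; simp [Ne.symm hlx]
        · rw [pv_idxs_append, if_pos rfl, pv_idxs_of_not_mem t x hxnt]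
          simp [PySem.Set.ofList, PySem.Set.add, PySem.Set.contains]

-- A's index loop over range(k) is pvBuild of the clamped prefix
theorem pv_portA_fold (nodes : List Int) (k : Int) (hk : k ≤ (nodes.length : Int)) :
    (PySem.List.pyRange 0 k 1).foldl
      (fun (d : PySem.Dict Int (List Int)) i => pvStep d (i, PySem.List.pyGetD nodes i 0))
      PySem.Dict.empty
    = pvBuild (nodes.take (max k 0).toNat) := by
  set labels := nodes.take (max k 0).toNat with hlab
  have hlen : (labels.length : Int) = max k 0 := by
    simp only [hlab, List.length_take]
    omega
  have hrange : PySem.List.pyRange 0 k 1 = PySem.List.pyRange 0 (labels.length : Int) 1 := by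
    rw [hlen]
    by_cases h : 0 ≤ k
    · rw [max_eq_left h]
    · rw [max_eq_right (by omega), PySem.List.pyRange_one_eq_nil (by omega),
        PySem.List.pyRange_one_eq_nil le_rfl]
  rw [hrange, pvBuild]
  rw [PySem.List.enumerate_eq_map_pyRange labels (0 : Int), List.foldl_map]
  rw [PySem.List.len_eq]
  refine PySem.List.foldl_congr_mem _ _ _ _ (fun d j hj => ?_)
  rw [PySem.List.mem_pyRange_one] at hj
  have h1 : PySem.List.pyGetD nodes j 0 = nodes[j.toNat] := by
    apply PySem.List.pyGetD_eq_getElem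
    · exact hj.1
    · have := hj.2; push_cast at this ⊢; omega
  have h2 : PySem.List.pyGetD labels j 0 = labels[j.toNat]'(by omega) := by
    apply PySem.List.pyGetD_eq_getElem
    · exact hj.1
    · exact hj.2
  rw [h1, h2]
  congr 2
  simp [hlab]

-- folding Set.add into x :: o collects each later x into the head slot
theorem pv_foldl_add_cons (x : Int) (l o : List Int) :
    l.foldl PySem.Set.add (x :: o) = x :: (l.filter (fun y => y != x)).foldl PySem.Set.add o := by
  induction l generalizing o with
  | nil => rfl
  | cons a t ih =>
    by_cases hax : a = x
    · subst hax
      have hadd : PySem.Set.add (a :: o) a = a :: o := by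
        simp [PySem.Set.add, PySem.Set.contains]
      rw [List.foldl_cons, hadd, ih, List.filter_cons_of_neg (by simp)]
    · have h1 : PySem.Set.add (x :: o) a = x :: PySem.Set.add o a := by
        simp only [PySem.Set.add, PySem.Set.contains]
        by_cases hm : a ∈ o <;> simp [hm, hax]
      simp [hax, h1, ih]

-- PySem ordered dedup, first element pulled out
theorem pv_dedup_cons (x : Int) (l : List Int) :
    PySem.List.dedup (x :: l) = x :: PySem.List.dedup (l.filter (fun y => y != x)) := by
  rw [PySem.List.dedup_eq_ofList, PySem.List.dedup_eq_ofList,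
    PySem.Set.ofList_eq_foldl, PySem.Set.ofList_eq_foldl]
  have h0 : PySem.Set.add ([] : List Int) x = [x] := by
    simp [PySem.Set.add, PySem.Set.contains]
  simp only [List.foldl_cons, h0]
  exact pv_foldl_add_cons x l []

-- filter/map exchange helpers for the pair table
theorem pv_fst_filter (t : List (Int × Int)) (pr : Int → Bool) :
    (t.map Prod.fst).filter pr = (t.filter (fun q => pr q.1)).map Prod.fst := by
  induction t with
  | nil => rfl
  | cons a s ih => by_cases h : pr a.1 <;> simp [h, ih]

theorem pv_snd_filter (t : List (Int × Int)) (pr : Int → Bool) :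
    (t.filter (fun q => pr q.2)).map Prod.snd = (t.map Prod.snd).filter pr := by
  induction t with
  | nil => rfl
  | cons a s ih => by_cases h : pr a.2 <;> simp [h, ih]

theorem pv_pairs_filter (t : List (Int × Int)) (pr : Int → Bool) :
    (t.map (fun p : Int × Int => (p.2, p.1 + 1))).filter (fun q => pr q.1)
      = (t.filter (fun p => pr p.2)).map (fun p : Int × Int => (p.2, p.1 + 1)) := by
  induction t with
  | nil => rfl
  | cons a s ih => by_cases h : pr a.2 <;> simp [h, ih]

-- B's recursion, characterised: keys in first-occurrence order, full gather per key
theorem pv_go_eq (acc : List (Int × List Int)) (ps : List (Int × Int)) :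
    pvGo acc ps = acc ++ (PySem.List.dedup (ps.map Prod.fst)).map
      (fun lab => (lab, PySem.Set.ofList ((ps.filter (fun q => q.1 == lab)).map Prod.snd))) := by
  induction acc, ps using pvGo.induct with
  | case1 acc => rw [pvGo]; simp
  | case2 acc p t ih =>
    rw [pvGo, ih, List.append_assoc, List.singleton_append]
    have hfm : (t.map Prod.fst).filter (fun y => y != p.1)
        = ((p :: t).filter (fun q => q.1 != p.1)).map Prod.fst := by
      rw [List.filter_cons_of_neg (by simp)]
      exact pv_fst_filter t (fun y => y != p.1)
    simp only [List.map_cons]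
    rw [pv_dedup_cons, hfm]
    simp only [List.map_cons]
    congr 2
    refine List.map_congr_left (fun lab hlab => ?_)
    have hlabne : lab ≠ p.1 := by
      rw [PySem.List.mem_dedup, List.mem_map] at hlab
      obtain ⟨q, hq, rfl⟩ := hlab
      rw [List.mem_filter] at hq
      simpa using hq.2
    refine congrArg (fun l : List (Int × Int) => (lab, PySem.Set.ofList (l.map Prod.snd))) ?_
    rw [List.filter_filter]
    refine List.filter_congr (fun q _ => ?_)
    by_cases hq : q.1 = lab <;> simp [hq, hlabne]

-- B is pvGroup of the same prefix
theorem pv_portB_eq (nodes : List Int) (v : Option Int) :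
    cliques_from_list_alt nodes v
      = pvGroup (nodes.take (max (v.getD (nodes.length : Int)) 0).toNat) := by
  simp only [cliques_from_list_alt]
  rw [PySem.List.slice_to _ (le_max_right _ _)]
  set labels := nodes.take (max (v.getD (nodes.length : Int)) 0).toNat with hlab
  rw [pv_go_eq, List.nil_append]
  have hfst : (((PySem.List.enumerate labels 0).filter (fun p => p.2 != 0)).map
      (fun p => (p.2, p.1 + 1))).map Prod.fst = labels.filter (fun y => y != 0) := by
    rw [List.map_map]
    exact (pv_snd_filter (PySem.List.enumerate labels 0) (fun y => y != 0)).trans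
      (by rw [PySem.List.map_snd_enumerate])
  have hdedup : PySem.List.dedup (labels.filter (fun y => y != 0)) = labels.foldl pvOrdf [] := by
    have : labels.filter (fun y => y != 0) = labels.filter (fun lab => decide (lab ≠ 0)) := by
      refine List.filter_congr (fun a _ => ?_)
      by_cases h : a = 0 <;> simp [h]
    rw [this]
    -- ordered dedup of the nonzero labels is A's first-occurrence key order
    clear hfst hlab
    induction labels using List.reverseRecOn with
    | nil => rfl
    | append_singleton t x ihd =>
      rw [List.filter_append, List.foldl_append]
      by_cases hx : x = 0
      · subst hx
        simpa [pvOrdf] using ihd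
      · have hfx : List.filter (fun lab => decide (lab ≠ 0)) [x] = [x] := by simp [hx]
        rw [hfx, PySem.List.dedup_eq_ofList, PySem.Set.ofList_append_singleton,
          ← PySem.List.dedup_eq_ofList, ihd]
        simp only [List.foldl_cons, List.foldl_nil, PySem.Set.add, PySem.Set.contains, pvOrdf]
        by_cases hm : x ∈ t.foldl pvOrdf [] <;> simp [hm, hx]
  rw [hfst, hdedup]
  unfold pvGroup
  refine List.map_congr_left (fun lab hlab2 => ?_)
  have hlabne : lab ≠ 0 := ((pv_mem_ordFold labels [] lab).1 hlab2).elim (by simp) (fun h => h.2)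
  have hpairs : ((((PySem.List.enumerate labels 0).filter (fun p => p.2 != 0)).map
      (fun p => (p.2, p.1 + 1))).filter (fun q => q.1 == lab)).map Prod.snd
      = pvIdxs labels lab := by
    have h0 : (((PySem.List.enumerate labels 0).filter (fun p => p.2 != 0)).map
        (fun p : Int × Int => (p.2, p.1 + 1))).filter (fun q => q.1 == lab)
        = (((PySem.List.enumerate labels 0).filter (fun p => p.2 != 0)).filter
            (fun p => p.2 == lab)).map (fun p : Int × Int => (p.2, p.1 + 1)) :=
      pv_pairs_filter _ (fun y => y == lab)
    rw [h0, List.map_map]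
    have h1 : ((PySem.List.enumerate labels 0).filter (fun p => p.2 != 0)).filter
        (fun p => p.2 == lab) = (PySem.List.enumerate labels 0).filter (fun p => p.2 == lab) := by
      rw [List.filter_filter]
      refine List.filter_congr (fun q _ => ?_)
      by_cases hq : q.2 = lab <;> simp [hq, hlabne]
    rw [h1]
    rfl
  rw [hpairs, PySem.Set.ofList_eq_self_of_nodup _ (pv_nodup_idxs _ lab)]

-- ===== VERDICT (by name: the statement is the Claim_ definition above) =====
theorem cliques_from_list_spec : Claim_equal_cliques_from_list := by
  intro nodes v _hdom hpre
  unfold Spec_cliques_from_list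
  unfold Pre_cliques_from_list at hpre
  have hk : v.getD (nodes.length : Int) ≤ (nodes.length : Int) := by
    cases v with
    | none => simp
    | some k => simpa using hpre
  rw [pv_portB_eq]
  show ((PySem.List.pyRange 0 (v.getD (nodes.length : Int)) 1).foldl
      (fun (d : PySem.Dict Int (List Int)) i => pvStep d (i, PySem.List.pyGetD nodes i 0))
      PySem.Dict.empty).items
    = pvGroup (nodes.take (max (v.getD (nodes.length : Int)) 0).toNat)
  rw [pv_portA_fold nodes _ hk, pv_build_eq]
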